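-- pv_equiv track=rewrite | github.com/TexasCountry01/advisor-portal-app | fix_tech_diagrams.py | remove_diagrams
-- ===== SOURCE A (Python) =====
-- def remove_diagrams(text):
--     """Remove all code block diagrams from text"""
--     lines = text.split('\n')
--     result = []
--     in_diagram = False
--
--     for line in lines:
--         if line.strip().startswith('```'):
--             in_diagram = not in_diagram
--             # Skip the line with backticks if it's a diagram
--             if in_diagram:
--                 continue
--         elif not in_diagram:
--             result.append(line)
--
--     return '\n'.join(result)
-- ===== SOURCE B (Python) =====
-- def remove_diagrams(text):
--     """Remove all code block diagrams from text"""
--     groups = []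
--     cur = []
--     for line in text.split('\n'):
--         if line.strip().startswith('```'):
--             groups.append(cur)
--             cur = []
--         else:
--             cur.append(line)
--     groups.append(cur)
--     kept = [ln for i, grp in enumerate(groups) if i % 2 == 0 for ln in grp]
--     return '\n'.join(kept)
-- ===== Notes on version B (the rewrite author's own statement) =====
-- stated objective: alternative
-- what changed: Replaces the stateful in_diagram toggle with a delimiter-partition: lines are grouped into runs separated by fence lines, then the even-indexed groups are flattened and joined.
import Mathlib
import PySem

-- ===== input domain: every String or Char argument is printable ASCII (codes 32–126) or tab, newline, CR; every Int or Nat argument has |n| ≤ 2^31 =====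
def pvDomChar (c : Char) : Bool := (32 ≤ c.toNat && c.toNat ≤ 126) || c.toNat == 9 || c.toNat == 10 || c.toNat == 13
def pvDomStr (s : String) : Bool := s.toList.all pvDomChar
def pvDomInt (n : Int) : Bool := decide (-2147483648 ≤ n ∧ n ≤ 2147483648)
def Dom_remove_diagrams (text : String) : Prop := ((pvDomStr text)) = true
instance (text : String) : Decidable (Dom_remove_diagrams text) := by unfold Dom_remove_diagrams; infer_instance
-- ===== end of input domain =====

-- B removes fence-delimited blocks by partitioning the lines at the fences and keeping the
-- even-indexed groups, instead of A's stateful in_diagram toggle (alternative decomposition).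

-- ===== PORT A =====
def remove_diagrams (text : String) : String :=
  -- text.split('\n'): sep is the non-empty literal "\n", so split? is always `some`
  let lines := (PySem.Str.split? text "\n").getD []
  let st := lines.foldl (fun (st : List String × Bool) line =>
      if PySem.Str.startswith (PySem.Str.strip line) "```" then
        -- toggle; the line is skipped either way (opening: continue; closing: no append branch)
        (st.1, !st.2)
      else if !st.2 then
        (st.1 ++ [line], st.2)
      else
        st) ([], false)
  PySem.Str.join "\n" st.1

-- ===== PORT B =====
def remove_diagrams_alt (text : String) : String :=
  -- text.split('\n'): sep is the non-empty literal "\n", so split? is always `some`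
  let lines := (PySem.Str.split? text "\n").getD []
  let st := lines.foldl (fun (st : List (List String) × List String) line =>
      if PySem.Str.startswith (PySem.Str.strip line) "```" then
        (st.1 ++ [st.2], [])
      else
        (st.1, st.2 ++ [line])) ([], [])
  let groups := st.1 ++ [st.2]
  let kept := ((PySem.List.enumerate groups).filter
      (fun p => PySem.Int.mod p.1 2 == 0)).flatMap (·.2)
  PySem.Str.join "\n" kept

-- ===== PRECONDITION & SPEC =====
def Spec_remove_diagrams (text : String) (out : String) : Prop := out = remove_diagrams_alt text
instance (text : String) (out : String) : Decidable (Spec_remove_diagrams text out) := by unfold Spec_remove_diagrams; infer_instance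

-- ===== CLAIM (what is proved, stated in full; the proofs are below) =====
def Claim_equal_remove_diagrams : Prop := ∀ (text : String), Dom_remove_diagrams text → Spec_remove_diagrams text (remove_diagrams text)

-- ===== LEMMAS AND PROOFS =====

-- flatten of the even-indexed groups, exactly as port B computes it
def pvEvenFlat (gs : List (List String)) : List String :=
  ((PySem.List.enumerate gs).filter (fun p => PySem.Int.mod p.1 2 == 0)).flatMap (·.2)

theorem pvModTwo (n : Nat) : (PySem.Int.mod (0 + (n:Int)) 2 == 0) = decide (n % 2 = 0) := by
  have h : (n:Int).fmod 2 = ((n % 2 : Nat) : Int) := by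
    rw [Int.fmod_eq_emod]; push_cast; simp
  simp only [PySem.Int.mod, zero_add, h]
  by_cases h2 : n % 2 = 0 <;> simp [h2] <;> omega

theorem pvEvenFlat_append (gs : List (List String)) (c : List String) :
    pvEvenFlat (gs ++ [c]) = pvEvenFlat gs ++ (if gs.length % 2 = 0 then c else []) := by
  unfold pvEvenFlat
  rw [PySem.List.enumerate_append, List.filter_append, List.flatMap_append]
  congr 1
  simp only [PySem.List.enumerate, List.filter, pvModTwo]
  by_cases h : gs.length % 2 = 0 <;> simp [h]

theorem pv_loop (lines : List String) (res : List String)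
    (gs : List (List String)) (c : List String) (b : Bool)
    (hres : res = pvEvenFlat (gs ++ [c])) (hb : b = decide (gs.length % 2 = 1)) :
    (lines.foldl (fun (st : List String × Bool) line =>
      if PySem.Str.startswith (PySem.Str.strip line) "```" then (st.1, !st.2)
      else if !st.2 then (st.1 ++ [line], st.2) else st) (res, b)).1
    = pvEvenFlat (((lines.foldl (fun (st : List (List String) × List String) line =>
        if PySem.Str.startswith (PySem.Str.strip line) "```" then (st.1 ++ [st.2], [])
        else (st.1, st.2 ++ [line])) (gs, c)).1)
      ++ [(lines.foldl (fun (st : List (List String) × List String) line =>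
        if PySem.Str.startswith (PySem.Str.strip line) "```" then (st.1 ++ [st.2], [])
        else (st.1, st.2 ++ [line])) (gs, c)).2]) := by
  induction lines generalizing res gs c b with
  | nil => simpa using hres
  | cons line rest ih =>
    simp only [List.foldl_cons]
    by_cases hf : PySem.Str.startswith (PySem.Str.strip line) "```"
    · simp only [hf, if_pos]
      apply ih
      · rw [pvEvenFlat_append (gs ++ [c]) [], hres]
        simp
      · rw [hb]
        rcases Nat.mod_two_eq_zero_or_one gs.length with h | h <;>
          simp [List.length_append, h] <;> omega
    · simp only [hf, if_false, Bool.false_eq_true]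
      by_cases hbv : b = false
      · subst hbv
        have hge : gs.length % 2 = 0 := by
          rcases Nat.mod_two_eq_zero_or_one gs.length with h | h
          · exact h
          · simp [h] at hb
        simp only [Bool.not_false, if_pos]
        apply ih
        · rw [pvEvenFlat_append, hres, pvEvenFlat_append]
          simp [hge]
        · exact hb
      · have hbv' : b = true := by revert hbv; cases b <;> simp
        subst hbv'
        have hgo : gs.length % 2 = 1 := by
          rcases Nat.mod_two_eq_zero_or_one gs.length with h | h
          · simp [h] at hb
          · exact h
        simp only [Bool.not_true, if_false, Bool.false_eq_true]
        apply ih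
        · rw [pvEvenFlat_append, hres, pvEvenFlat_append]
          simp [hgo]
        · exact hb

-- ===== VERDICT (by name: the statement is the Claim_ definition above) =====
theorem remove_diagrams_spec : Claim_equal_remove_diagrams := by
  intro text _
  unfold Spec_remove_diagrams remove_diagrams remove_diagrams_alt
  exact congrArg (PySem.Str.join "\n")
    (pv_loop ((PySem.Str.split? text "\n").getD []) [] [] [] false
      (by simp [pvEvenFlat, PySem.List.enumerate, PySem.Int.mod]) (by simp))
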